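-- pv_equiv track=rewrite | github.com/gyasis/PromptChain | promptchain/cli/tui/chat_view.py | _looks_like_markdown
-- ===== SOURCE A (Python) =====
-- def _looks_like_markdown(text: str) -> bool:
--     """Check if text appears to contain markdown formatting.
--
--     Args:
--         text: Text to check
--
--     Returns:
--         True if text likely contains markdown
--     """
--     # Common markdown patterns
--     markdown_indicators = [
--         "**",  # Bold
--         "__",  # Bold alt
--         "```",  # Code block
--         "`",  # Inline code
--         "# ",  # Headers
--         "## ",
--         "### ",
--         "- ",  # Lists
--         "1. ",  # Numbered lists
--         "[",  # Links
--         "> ",  # Blockquotes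
--     ]
--     # Note: Removed single "*" and "_" as they cause false positives
--     return any(indicator in text for indicator in markdown_indicators)
-- ===== SOURCE B (Python) =====
-- _MD_PREFIXES = ("**", "__", "`", "# ", "- ", "1. ", "[", "> ")
--
--
-- def _looks_like_markdown(text: str) -> bool:
--     # single left-to-right scan: at each position, does any indicator start here?
--     return any(text.startswith(_MD_PREFIXES, i) for i in range(len(text)))
-- ===== Notes on version B (the rewrite author's own statement) =====
-- stated objective: alternative
-- what changed: Replaces eleven separate substring-membership scans with one left-to-right scan that checks a reduced prefix set (dropping indicators subsumed by others: '```' by '`', '## '/'### ' by '# ') at each position via str.startswith on a tuple.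
import Mathlib
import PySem

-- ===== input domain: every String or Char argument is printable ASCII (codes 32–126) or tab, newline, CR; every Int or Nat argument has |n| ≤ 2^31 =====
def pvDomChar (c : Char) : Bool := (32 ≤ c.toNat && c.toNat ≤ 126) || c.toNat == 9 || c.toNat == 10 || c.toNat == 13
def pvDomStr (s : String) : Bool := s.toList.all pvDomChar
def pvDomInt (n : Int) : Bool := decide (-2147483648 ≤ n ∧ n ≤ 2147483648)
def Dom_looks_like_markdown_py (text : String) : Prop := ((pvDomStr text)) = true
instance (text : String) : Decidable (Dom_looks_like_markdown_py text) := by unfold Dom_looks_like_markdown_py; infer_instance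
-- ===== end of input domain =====

-- B replaces eleven separate substring scans by one left-to-right scan testing a reduced
-- prefix set at each position (alternative decomposition, same asymptotic cost).


-- ===== PORT A =====
-- the indicator list, exactly as in the Python source
def mdIndicators : List String :=
  ["**", "__", "```", "`", "# ", "## ", "### ", "- ", "1. ", "[", "> "]

def looks_like_markdown_py (text : String) : Bool :=
  mdIndicators.any (fun ind => PySem.Str.isIn ind text)

-- ===== PORT B =====
-- reduced prefix set checked at each position (per Source B's _MD_PREFIXES)
def mdPrefixes : List (List Char) :=
  ["**".toList, "__".toList, "`".toList, "# ".toList, "- ".toList, "1. ".toList, "[".toList, "> ".toList]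

-- 'any(text.startswith(_MD_PREFIXES, i) for i in range(len(text)))' as a scan over suffixes
def mdScan : List Char → Bool
  | [] => false
  | c :: rest => mdPrefixes.any (fun p => p.isPrefixOf (c :: rest)) || mdScan rest

def looks_like_markdown_py_alt (text : String) : Bool := mdScan text.toList

-- ===== PRECONDITION & SPEC =====
def Spec_looks_like_markdown_py (text : String) (out : Bool) : Prop := out = looks_like_markdown_py_alt text
instance (text : String) (out : Bool) : Decidable (Spec_looks_like_markdown_py text out) := by unfold Spec_looks_like_markdown_py; infer_instance

-- ===== CLAIM (what is proved, stated in full; the proofs are below) =====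
def Claim_equal_looks_like_markdown_py : Prop := ∀ (text : String), Dom_looks_like_markdown_py text → Spec_looks_like_markdown_py text (looks_like_markdown_py text)

-- ===== LEMMAS AND PROOFS =====

-- B's scan finds exactly the suffix-prefix (= infix) occurrences of its prefix set
theorem mdScan_iff (cs : List Char) :
    mdScan cs = true ↔ ∃ p ∈ mdPrefixes, p <:+: cs := by
  induction cs with
  | nil =>
    simp only [mdScan, List.infix_nil]
    constructor
    · intro h; exact absurd h (by decide)
    · rintro ⟨p, hp, rfl⟩; revert hp; decide
  | cons c rest ih =>
    simp only [mdScan, Bool.or_eq_true, List.any_eq_true, ih]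
    constructor
    · rintro (⟨p, hp, hpre⟩ | ⟨p, hp, hinf⟩)
      · exact ⟨p, hp, ((List.isPrefixOf_iff_prefix).mp hpre).isInfix⟩
      · exact ⟨p, hp, List.infix_cons hinf⟩
    · rintro ⟨p, hp, hinf⟩
      rcases (List.infix_cons_iff).mp hinf with hpre | hrest
      · exact Or.inl ⟨p, hp, (List.isPrefixOf_iff_prefix).mpr hpre⟩
      · exact Or.inr ⟨p, hp, hrest⟩

theorem looks_like_markdown_py_eq_true_iff (text : String) :
    looks_like_markdown_py text = true ↔ ∃ s ∈ mdIndicators, s.toList <:+: text.toList := by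
  simp only [looks_like_markdown_py, List.any_eq_true, PySem.Str.isIn_iff_infix]

theorem looks_like_markdown_py_spec' (text : String) :
    looks_like_markdown_py text = looks_like_markdown_py_alt text := by
  rw [Bool.eq_iff_iff, looks_like_markdown_py_eq_true_iff, looks_like_markdown_py_alt, mdScan_iff]
  constructor
  · rintro ⟨s, hs, hinf⟩
    fin_cases hs
    · exact ⟨"**".toList, by decide, hinf⟩
    · exact ⟨"__".toList, by decide, hinf⟩
    · exact ⟨"`".toList, by decide, (by decide : "`".toList <:+: "```".toList).trans hinf⟩
    · exact ⟨"`".toList, by decide, hinf⟩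
    · exact ⟨"# ".toList, by decide, hinf⟩
    · exact ⟨"# ".toList, by decide, (by decide : "# ".toList <:+: "## ".toList).trans hinf⟩
    · exact ⟨"# ".toList, by decide, (by decide : "# ".toList <:+: "### ".toList).trans hinf⟩
    · exact ⟨"- ".toList, by decide, hinf⟩
    · exact ⟨"1. ".toList, by decide, hinf⟩
    · exact ⟨"[".toList, by decide, hinf⟩
    · exact ⟨"> ".toList, by decide, hinf⟩
  · rintro ⟨p, hp, hinf⟩
    fin_cases hp
    · exact ⟨"**", by decide, hinf⟩
    · exact ⟨"__", by decide, hinf⟩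
    · exact ⟨"`", by decide, hinf⟩
    · exact ⟨"# ", by decide, hinf⟩
    · exact ⟨"- ", by decide, hinf⟩
    · exact ⟨"1. ", by decide, hinf⟩
    · exact ⟨"[", by decide, hinf⟩
    · exact ⟨"> ", by decide, hinf⟩

-- ===== VERDICT (by name: the statement is the Claim_ definition above) =====
theorem looks_like_markdown_py_spec : Claim_equal_looks_like_markdown_py :=
  fun text _ => looks_like_markdown_py_spec' text
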